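-- pv_equiv track=rewrite | github.com/ID-CC/Team-C | Hyeokeun/week5/bad_user.py | solution
-- ===== SOURCE A (Python) =====
-- import copy
--
-- def dfs(tree: [], depth, combination, visited=None):
--     max_depth = len(tree)
--
--     if depth == max_depth:
--         combination.append(copy.deepcopy(visited))
--         return
--
--     if visited is None:
--         visited = list()
--
--     nodes = tree[depth]
--     for node in nodes:
--         if node in visited:  # 상위 level에서 대입했던 user id
--             continue
--         visited.append(node)
--         dfs(tree, depth + 1, combination, visited)
--         visited.remove(node)
--
-- def solution(user_id, banned_id):
--     answer = 0
--
--     candid_ban = [list() for _ in range(len(banned_id))]  # 각 banned_id 원소와 조건이 맞는 id를 저장하는 배열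
--
--     for idx_ban in range(0, len(banned_id)):
--         for user in user_id:
--             if len(user) == len(banned_id[idx_ban]):
--                 matched = 0
--                 for idx in range(0, len(user)):
--                     if user[idx] == banned_id[idx_ban][idx] or banned_id[idx_ban][idx] == '*':
--                         matched += 1
--                 if matched == len(user):
--                     candid_ban[idx_ban].append(user)
--
--     combination = list()
--     dfs(candid_ban, 0, combination)
--     list_concatenated = list()
--     for itr in combination:
--         itr.sort()
--         concatenated = ''
--         for itr2 in itr:
--             concatenated += itr2
--         list_concatenated.append(concatenated)
--     list_concatenated = list(set(list_concatenated))
--     answer = len(list_concatenated)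
--
--     return answer
-- ===== SOURCE B (Python) =====
-- def solution(user_id, banned_id):
--     # per-pattern candidate lists, matched via zip instead of index counting
--     candid = [[u for u in user_id
--                if len(u) == len(b) and all(bc == '*' or bc == uc
--                                            for uc, bc in zip(u, b))]
--               for b in banned_id]
--     # breadth-first cartesian product instead of recursive DFS with pruning
--     combos = [[]]
--     for cands in candid:
--         combos = [c + [x] for c in combos for x in cands]
--     # keep injective assignments only; dedup by the sorted-concatenation key
--     keys = {''.join(sorted(c)) for c in combos if len(set(c)) == len(c)}
--     return len(keys)
-- ===== Notes on version B (the rewrite author's own statement) =====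
-- stated objective: alternative
-- what changed: Replaces the recursive DFS with in-place visited/backtracking by an iterative breadth-first cartesian-product build followed by a late distinctness filter, and replaces the index-counting pattern match by a zip/all match; the sorted-concatenation dedup key is kept.
-- crash fix: On empty banned_id A raises AttributeError (it sorts the deep-copied None visited); B returns 1 (the single empty assignment). — e.g. on solution(["ab"], []): A raises AttributeError, B returns 1
import Mathlib
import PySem

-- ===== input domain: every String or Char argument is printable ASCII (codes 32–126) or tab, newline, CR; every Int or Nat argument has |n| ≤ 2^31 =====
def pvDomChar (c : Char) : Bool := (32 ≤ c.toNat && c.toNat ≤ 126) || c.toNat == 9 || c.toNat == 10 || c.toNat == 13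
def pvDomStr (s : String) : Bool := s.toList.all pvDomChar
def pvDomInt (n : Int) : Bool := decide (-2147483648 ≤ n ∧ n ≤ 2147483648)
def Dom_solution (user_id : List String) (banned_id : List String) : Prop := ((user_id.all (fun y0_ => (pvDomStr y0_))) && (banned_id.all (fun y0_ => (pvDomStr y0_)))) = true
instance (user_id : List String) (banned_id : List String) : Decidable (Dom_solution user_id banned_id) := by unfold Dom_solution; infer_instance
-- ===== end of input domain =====

-- B replaces A's recursive DFS with backtracking by an iterative breadth-first
-- cartesian-product build with a late distinctness filter, and the index-counting
-- pattern match by a zip/all match (objective: alternative).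

-- ===== PORT A =====
-- port of 'dfs': structural recursion on the remaining levels of the tree;
-- the returned list is the 'combination' accumulator, 'visited' the current path
def dfsA : List (List String) → List String → List (List String)
  | [], visited => [visited]
  | nodes :: rest, visited =>
      nodes.foldl (fun comb node =>
        if visited.contains node then comb
        else comb ++ dfsA rest (visited ++ [node])) []

def solution (user_id : List String) (banned_id : List String) : Int :=
  -- candid_ban[idx_ban], filled by the double loop one ban at a time
  let candid_ban := banned_id.map (fun ban =>
    user_id.foldl (fun acc user =>
      if PySem.Str.len user == PySem.Str.len ban then
        let matched := (PySem.List.pyRange 0 (PySem.Str.len user) 1).foldl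
          (fun m idx =>
            if PySem.List.pyGetD user.toList idx ' ' == PySem.List.pyGetD ban.toList idx ' '
               || PySem.List.pyGetD ban.toList idx ' ' == '*' then m + 1 else m) (0 : Int)
        if matched == PySem.Str.len user then acc ++ [user] else acc
      else acc) [])
  let combination := dfsA candid_ban []
  let list_concatenated := combination.foldl (fun acc itr =>
      let itr2 := PySem.List.sorted itr (fun x => x) false
      let concatenated := itr2.foldl (fun s t => s ++ t) ""
      acc ++ [concatenated]) []
  PySem.Set.len (PySem.Set.ofList list_concatenated)

-- ===== PORT B =====
def solution_alt (user_id : List String) (banned_id : List String) : Int :=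
  let candid := banned_id.map (fun b =>
    user_id.filter (fun u =>
      u.toList.length == b.toList.length &&
      (u.toList.zip b.toList).all (fun p => p.2 == '*' || p.2 == p.1)))
  let combos := candid.foldl
      (fun combos cands => combos.flatMap (fun c => cands.map (fun x => c ++ [x]))) [[]]
  let keys := PySem.Set.ofList
      ((combos.filter (fun c => PySem.Set.len (PySem.Set.ofList c) == PySem.List.len c)).map
        (fun c => PySem.Str.join "" (PySem.List.sorted c (fun x => x) false)))
  PySem.Set.len keys

-- ===== PRECONDITION & SPEC =====
-- Pre_ excludes exactly empty banned_id, where A raises AttributeError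
-- (dfs deep-copies the None visited into combination and then calls .sort() on it).
def Pre_solution (user_id : List String) (banned_id : List String) : Prop := banned_id ≠ []
instance (user_id : List String) (banned_id : List String) : Decidable (Pre_solution user_id banned_id) := by unfold Pre_solution; infer_instance
def pvWitness_solution : List String × List String := (["ab", "cb"], ["*b"])

-- On empty banned_id A raises AttributeError (the None visited reaches itr.sort()); B returns 1, counting the single empty assignment.
def Raises_solution (user_id : List String) (banned_id : List String) : Prop := banned_id = []
instance (user_id : List String) (banned_id : List String) : Decidable (Raises_solution user_id banned_id) := by unfold Raises_solution; infer_instance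
def pvRaiseWitness_solution : List String × List String := (["ab"], [])
def pvRaiseWitnessOut_solution : Int := 1

def Spec_solution (user_id : List String) (banned_id : List String) (out : Int) : Prop := out = solution_alt user_id banned_id
instance (user_id : List String) (banned_id : List String) (out : Int) : Decidable (Spec_solution user_id banned_id out) := by unfold Spec_solution; infer_instance

-- ===== CLAIM (what is proved, stated in full; the proofs are below) =====
def Claim_equal_solution : Prop := ∀ (user_id : List String) (banned_id : List String), Dom_solution user_id banned_id → Pre_solution user_id banned_id → Spec_solution user_id banned_id (solution user_id banned_id)
def Claim_raises_solution : Prop := (∀ (user_id : List String) (banned_id : List String), Dom_solution user_id banned_id → Raises_solution user_id banned_id → ¬ Pre_solution user_id banned_id) ∧ (Dom_solution (pvRaiseWitness_solution.1) (pvRaiseWitness_solution.2) ∧ Raises_solution (pvRaiseWitness_solution.1) (pvRaiseWitness_solution.2) ∧ solution_alt (pvRaiseWitness_solution.1) (pvRaiseWitness_solution.2) = pvRaiseWitnessOut_solution)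

-- ===== LEMMAS AND PROOFS =====

-- the cartesian product of the candidate lists (proof-side reference object)
def cartP : List (List String) → List (List String)
  | [] => [[]]
  | xs :: rest => xs.flatMap (fun x => (cartP rest).map (x :: ·))

-- 'this tuple extends visited without ever repeating an element'
def okFrom (v : List String) : List String → Bool
  | [] => true
  | x :: t => !v.contains x && okFrom (v ++ [x]) t

theorem len_pyRange (n : Nat) : (PySem.List.pyRange 0 (n:Int) 1).length = n := by
  induction n with
  | zero => decide
  | succ k ih =>
      rw [show ((k+1:Nat):Int) = (k:Int)+1 by push_cast; ring,
        PySem.List.pyRange_one_succ_right (by positivity)]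
      simp [ih]

-- B's iterative product build equals cartP
theorem bfs_eq (tree : List (List String)) (acc : List (List String)) :
    tree.foldl (fun combos cands => combos.flatMap (fun c => cands.map (fun x => c ++ [x]))) acc
      = acc.flatMap (fun c => (cartP tree).map (fun t => c ++ t)) := by
  induction tree generalizing acc with
  | nil => simp [cartP]
  | cons xs rest ih =>
      simp only [List.foldl_cons, ih, cartP, List.flatMap_assoc, List.flatMap_map,
        List.map_flatMap, List.map_map]
      congr 1; funext c; congr 1; funext x; congr 1; funext t
      simp

-- A's DFS equals cartP filtered by okFrom
theorem dfs_eq (tree : List (List String)) (visited : List String) :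
    dfsA tree visited = ((cartP tree).filter (okFrom visited)).map (fun t => visited ++ t) := by
  induction tree generalizing visited with
  | nil => simp [dfsA, cartP, okFrom]
  | cons xs rest ih =>
      show xs.foldl _ [] = _
      have step : ∀ (comb : List (List String)) (node : String),
          (if visited.contains node then comb
           else comb ++ dfsA rest (visited ++ [node]))
          = comb ++ (if visited.contains node then [] else dfsA rest (visited ++ [node])) := by
        intro comb node; split <;> simp
      simp only [step, PySem.List.foldl_append_eq_flatMap, List.nil_append]
      simp only [cartP, List.filter_flatMap, List.filter_map, List.map_flatMap, List.map_map]
      congr 1; funext x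
      by_cases hx : x ∈ visited
      · have h1 : (okFrom visited ∘ fun t => x :: t) = fun _ => false := by
          funext t; simp [okFrom, hx]
        simp [hx, h1]
      · have h1 : (okFrom visited ∘ fun t => x :: t) = okFrom (visited ++ [x]) := by
          funext t; simp [okFrom, hx]
        rw [if_neg (by simp [hx]), ih, h1]
        simp [Function.comp_def]

theorem okFrom_iff (t v : List String) :
    okFrom v t = true ↔ (t.Nodup ∧ ∀ x ∈ t, x ∉ v) := by
  induction t generalizing v with
  | nil => simp [okFrom]
  | cons x s ih =>
      simp only [okFrom, Bool.and_eq_true, Bool.not_eq_true', ih, List.nodup_cons]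
      constructor
      · rintro ⟨h1, h2, h3⟩
        have hx : x ∉ v := by simpa using h1
        refine ⟨⟨fun hxs => by simpa [hx] using h3 x hxs, h2⟩, ?_⟩
        intro y hy
        rcases List.mem_cons.mp hy with rfl | hy
        · exact hx
        · have := h3 y hy; simp at this; tauto
      · rintro ⟨⟨hxs, h2⟩, h3⟩
        refine ⟨by simpa using h3 x (by simp), h2, ?_⟩
        intro y hy
        simp only [List.mem_append, List.mem_singleton]
        push_neg
        exact ⟨h3 y (by simp [hy]), fun h => hxs (h ▸ hy)⟩

-- B's distinctness test len(set(c)) == len(c) equals A's incremental okFrom test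
theorem pred_eq_ok (c : List String) :
    (PySem.Set.len (PySem.Set.ofList c) == PySem.List.len c) = okFrom [] c := by
  have hlen : PySem.Set.len (PySem.Set.ofList c) = ((PySem.Set.ofList c).length : Int) := by
    simp [PySem.Set.len]
  by_cases h : c.Nodup
  · have heq : PySem.Set.ofList c = c := PySem.Set.ofList_eq_self_of_nodup c h
    simp [hlen, heq, (okFrom_iff c []).2 ⟨h, by simp⟩]
  · have hperm : (PySem.Set.ofList c).Perm c.dedup :=
      (List.perm_ext_iff_of_nodup (PySem.Set.nodup_ofList c) c.nodup_dedup).mpr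
        (fun x => by simp [PySem.Set.mem_ofList, List.mem_dedup])
    have hle : c.dedup.length ≤ c.length := (List.dedup_sublist c).length_le
    have hne : c.dedup.length ≠ c.length := by
      intro hl
      exact h (List.dedup_eq_self.mp ((List.dedup_sublist c).eq_of_length hl))
    have h2 : okFrom [] c = false := by
      rcases Bool.eq_false_or_eq_true (okFrom [] c) with h' | h'
      · exact absurd ((okFrom_iff c []).1 h').1 h
      · exact h'
    have h3 : (PySem.Set.ofList c).length ≠ c.length := by
      rw [hperm.length_eq]; exact hne
    simp only [hlen, h2, PySem.List.len_eq]
    simp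
    exact_mod_cast h3

theorem zip_all_iff (u b : List Char) (h : u.length = b.length) :
    ((u.zip b).all (fun p => p.2 == '*' || p.2 == p.1)) = true ↔
    ∀ k : Nat, k < u.length →
      ((u.getD k ' ' == b.getD k ' ') || (b.getD k ' ' == '*')) = true := by
  induction u generalizing b with
  | nil => simp
  | cons c cs ih =>
      cases b with
      | nil => simp at h
      | cons d ds =>
          simp only [List.zip_cons_cons, List.all_cons, Bool.and_eq_true,
            ih ds (by simpa using h), List.length_cons]
          constructor
          · rintro ⟨h1, h2⟩ k hk
            cases k with
            | zero =>
                simp only [List.getD_cons_zero, Bool.or_eq_true, beq_iff_eq] at h1 ⊢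
                exact h1.elim (fun h => Or.inr h) (fun h => Or.inl h.symm)
            | succ j => simpa using h2 j (by omega)
          · intro hh
            refine ⟨?_, fun j hj => by simpa using hh (j+1) (by omega)⟩
            have h0 := hh 0 (by omega)
            simp only [List.getD_cons_zero, Bool.or_eq_true, beq_iff_eq] at h0 ⊢
            exact h0.elim (fun h => Or.inr h.symm) (fun h => Or.inl h)

-- A's per-user loop body (index counting) equals B's filter predicate (zip/all)
theorem stepA_eq (ban u : String) (acc : List String) :
    (if PySem.Str.len u == PySem.Str.len ban then
       (if ((PySem.List.pyRange 0 (PySem.Str.len u) 1).foldl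
            (fun m idx => if (PySem.List.pyGetD u.toList idx ' ' == PySem.List.pyGetD ban.toList idx ' '
                 || PySem.List.pyGetD ban.toList idx ' ' == '*') = true then m + 1 else m) (0:Int)) == PySem.Str.len u
        then acc ++ [u] else acc)
     else acc)
    = if (u.toList.length == ban.toList.length &&
          (u.toList.zip ban.toList).all (fun p => p.2 == '*' || p.2 == p.1)) then acc ++ [u] else acc := by
  simp only [PySem.Str.len_eq]
  by_cases hl : u.toList.length = ban.toList.length
  · have hfold : ((PySem.List.pyRange 0 ((u.toList.length : Int)) 1).foldl
        (fun m idx => if (PySem.List.pyGetD u.toList idx ' ' == PySem.List.pyGetD ban.toList idx ' '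
             || PySem.List.pyGetD ban.toList idx ' ' == '*') = true then m + 1 else m) (0:Int))
        = ((PySem.List.pyRange 0 ((u.toList.length:Int)) 1).countP
            (fun idx => (PySem.List.pyGetD u.toList idx ' ' == PySem.List.pyGetD ban.toList idx ' '
             || PySem.List.pyGetD ban.toList idx ' ' == '*')) : Int) := by
      rw [PySem.List.foldl_count_if]; ring
    have hmatched : (((PySem.List.pyRange 0 ((u.toList.length:Int)) 1).countP
            (fun idx => (PySem.List.pyGetD u.toList idx ' ' == PySem.List.pyGetD ban.toList idx ' '
             || PySem.List.pyGetD ban.toList idx ' ' == '*')) : Int) = ((u.toList.length:Int)))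
        ↔ ∀ i ∈ PySem.List.pyRange 0 ((u.toList.length:Int)) 1,
            (PySem.List.pyGetD u.toList i ' ' == PySem.List.pyGetD ban.toList i ' '
             || PySem.List.pyGetD ban.toList i ' ' == '*') = true := by
      rw [List.countP_eq_length_filter]
      constructor
      · intro h
        refine List.length_filter_eq_length_iff.mp ?_
        rw [len_pyRange]; exact_mod_cast h
      · intro h
        rw [List.filter_eq_self.mpr h, len_pyRange]
    have hforall : (∀ i ∈ PySem.List.pyRange 0 ((u.toList.length:Int)) 1,
            (PySem.List.pyGetD u.toList i ' ' == PySem.List.pyGetD ban.toList i ' '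
             || PySem.List.pyGetD ban.toList i ' ' == '*') = true)
        ↔ ∀ k : Nat, k < u.toList.length →
            ((u.toList.getD k ' ' == ban.toList.getD k ' ') || (ban.toList.getD k ' ' == '*')) = true := by
      constructor
      · intro h k hk
        have := h (k : Int) (PySem.List.mem_pyRange_one.mpr ⟨by positivity, by exact_mod_cast hk⟩)
        simpa [PySem.List.pyGetD_natCast] using this
      · intro h i hi
        obtain ⟨h0, hlt⟩ := PySem.List.mem_pyRange_one.mp hi
        lift i to Nat using h0
        have := h i (by exact_mod_cast hlt)
        simpa [PySem.List.pyGetD_natCast] using this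
    have hzip := zip_all_iff u.toList ban.toList hl
    have houter : ((u.toList.length : Int) == (ban.toList.length : Int)) = true := by
      simp [hl]
    have houterB : (u.toList.length == ban.toList.length) = true := by simp [hl]
    rw [if_pos houter]
    by_cases hz : ((u.toList.zip ban.toList).all (fun p => p.2 == '*' || p.2 == p.1)) = true
    · have hm : ((PySem.List.pyRange 0 ((u.toList.length:Int)) 1).foldl
          (fun m idx => if (PySem.List.pyGetD u.toList idx ' ' == PySem.List.pyGetD ban.toList idx ' '
               || PySem.List.pyGetD ban.toList idx ' ' == '*') = true then m + 1 else m) (0:Int)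
          == ((u.toList.length:Int))) = true := by
        rw [hfold]
        exact beq_iff_eq.mpr (hmatched.mpr (hforall.mpr (hzip.mp hz)))
      rw [if_pos hm, if_pos (by rw [houterB, hz]; rfl)]
    · have hm : ¬ (((PySem.List.pyRange 0 ((u.toList.length:Int)) 1).foldl
          (fun m idx => if (PySem.List.pyGetD u.toList idx ' ' == PySem.List.pyGetD ban.toList idx ' '
               || PySem.List.pyGetD ban.toList idx ' ' == '*') = true then m + 1 else m) (0:Int)
          == ((u.toList.length:Int))) = true) := by
        rw [hfold]
        intro h
        exact hz (hzip.mpr (hforall.mp (hmatched.mp (beq_iff_eq.mp h))))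
      rw [if_neg hm, if_neg (by simp [hz])]
  · have h1 : ¬ (((u.toList.length : Int) == (ban.toList.length : Int)) = true) := by
      simp; exact_mod_cast hl
    have h2 : ¬ ((u.toList.length == ban.toList.length &&
        (u.toList.zip ban.toList).all (fun p => p.2 == '*' || p.2 == p.1)) = true) := by
      intro h
      exact hl (beq_iff_eq.mp (_root_.Bool.and_eq_true _ _ |>.mp h).1)
    rw [if_neg h1, if_neg h2]

theorem toList_foldl_append (l : List String) (s : String) :
    (l.foldl (· ++ ·) s).toList = s.toList ++ (l.map String.toList).flatten := by
  induction l generalizing s with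
  | nil => simp
  | cons x t ih => simp [ih]

theorem join_nil_flatten (cs : List (List Char)) : PySem.Chars.join [] cs = cs.flatten := by
  simp only [PySem.Chars.join, List.intercalate]
  induction cs with
  | nil => rfl
  | cons c t ih => cases t <;> simp_all [List.intersperse]

-- A's incremental string concatenation equals B's ''.join
theorem concat_eq_join (l : List String) :
    l.foldl (fun s t => s ++ t) "" = PySem.Str.join "" l := by
  apply String.toList_inj.mp
  rw [PySem.Str.toList_join, show ("".toList : List Char) = [] from rfl, join_nil_flatten]
  simpa using toList_foldl_append l ""

-- ===== VERDICT (by name: the statement is the Claim_ definition above) =====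
theorem solution_spec : Claim_equal_solution := by
  intro user_id banned_id _ _
  unfold Spec_solution
  simp only [solution, solution_alt]
  have hcand : (fun ban => user_id.foldl (fun acc user =>
      if PySem.Str.len user == PySem.Str.len ban then
        (if ((PySem.List.pyRange 0 (PySem.Str.len user) 1).foldl
          (fun m idx =>
            if PySem.List.pyGetD user.toList idx ' ' == PySem.List.pyGetD ban.toList idx ' '
               || PySem.List.pyGetD ban.toList idx ' ' == '*' then m + 1 else m) (0 : Int))
            == PySem.Str.len user then acc ++ [user] else acc)
      else acc) [])
      = (fun b => user_id.filter (fun u =>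
          u.toList.length == b.toList.length &&
          (u.toList.zip b.toList).all (fun p => p.2 == '*' || p.2 == p.1))) := by
    funext ban
    have hstep : (fun (acc : List String) (user : String) =>
        if PySem.Str.len user == PySem.Str.len ban then
          (if ((PySem.List.pyRange 0 (PySem.Str.len user) 1).foldl
            (fun m idx =>
              if PySem.List.pyGetD user.toList idx ' ' == PySem.List.pyGetD ban.toList idx ' '
                 || PySem.List.pyGetD ban.toList idx ' ' == '*' then m + 1 else m) (0 : Int))
              == PySem.Str.len user then acc ++ [user] else acc)
        else acc)
        = (fun (acc : List String) (user : String) =>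
            if (user.toList.length == ban.toList.length &&
                (user.toList.zip ban.toList).all (fun p => p.2 == '*' || p.2 == p.1))
            then acc ++ [user] else acc) := by
      funext acc u
      exact stepA_eq ban u acc
    rw [hstep, PySem.List.foldl_append_if_eq_filter]
    simp
  rw [hcand, bfs_eq, dfs_eq]
  simp only [List.flatMap_cons, List.flatMap_nil, List.append_nil, List.nil_append,
    List.map_id_fun', List.map_id]
  rw [PySem.List.foldl_append_singleton_eq_map]
  have hpred : (fun c => PySem.Set.len (PySem.Set.ofList c) == PySem.List.len c) = okFrom [] :=
    funext pred_eq_ok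
  rw [hpred]
  have hmapf : (fun itr => (PySem.List.sorted itr (fun x => x) false).foldl (fun s t => s ++ t) "")
      = (fun c => PySem.Str.join "" (PySem.List.sorted c (fun x => x) false)) := by
    funext c
    exact concat_eq_join (PySem.List.sorted c (fun x => x) false)
  rw [List.nil_append, hmapf]
  simp only [id_eq]

@[simp] theorem solution_raises : Claim_raises_solution := by
  unfold Claim_raises_solution
  exact ⟨fun _ _ _ h => by simpa [Pre_solution] using h, by decide⟩
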